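-- pv_equiv track=rewrite | github.com/vnagpal25/aoc-2025 | 2023/day04/day4_part1.py | get_points_pt1
-- ===== SOURCE A (Python) =====
-- def get_points_pt1(win_nums, play_nums):
--   """
--   Returns the amount of points we get from a particular card
--   based on the numbers recieved and the winning number
--   """
--   # initial score is 0
--   score = 0
--
--   # convert winning numbers into a hashset O(n) time
--   # O(n) memory also
--   win_nums = set(win_nums)
--
--   # iterate over played numbers O(m) time
--   for num in play_nums:
--
--     #check membership in the winning numbers O(1)
--     if num in win_nums:
--       if not score:
--         # if this is our first match, then the score is one
--         score = 1
--       else: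
--         # else we double our score
--         score *= 2
--
--   # overall this is O(n + m) time and O(n) space
--   return score
-- ===== SOURCE B (Python) =====
-- def get_points_pt1(win_nums, play_nums):
--     winners = set(win_nums)
--     matches = sum(1 for num in play_nums if num in winners)
--     return 0 if matches == 0 else 2 ** (matches - 1)
-- ===== Notes on version B (the rewrite author's own statement) =====
-- stated objective: simpler
-- what changed: Replaces the stateful doubling accumulator loop with a one-pass match count followed by the closed form 2**(matches-1) (0 when no matches).
import Mathlib
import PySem

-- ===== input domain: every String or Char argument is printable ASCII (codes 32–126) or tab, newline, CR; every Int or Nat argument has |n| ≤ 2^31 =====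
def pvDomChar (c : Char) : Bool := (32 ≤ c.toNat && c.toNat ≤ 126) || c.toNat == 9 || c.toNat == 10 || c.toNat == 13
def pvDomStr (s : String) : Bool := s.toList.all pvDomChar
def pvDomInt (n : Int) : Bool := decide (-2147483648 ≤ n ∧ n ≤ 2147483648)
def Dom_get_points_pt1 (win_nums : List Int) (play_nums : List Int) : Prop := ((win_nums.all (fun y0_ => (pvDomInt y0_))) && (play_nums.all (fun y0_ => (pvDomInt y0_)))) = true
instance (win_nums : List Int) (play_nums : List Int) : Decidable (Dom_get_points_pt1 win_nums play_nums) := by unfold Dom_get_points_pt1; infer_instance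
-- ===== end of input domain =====

-- B replaces A's stateful doubling accumulator with a match count and the closed form
-- 2^(matches-1) (0 when there is no match); objective: simpler.

-- ===== PORT A =====
-- score = 0; win_nums = set(win_nums); for num in play_nums: if num in win_nums:
--   if not score: score = 1 else: score *= 2; return score
def get_points_pt1 (win_nums : List Int) (play_nums : List Int) : Int :=
  let ws := PySem.Set.ofList win_nums
  play_nums.foldl (fun score num =>
    if PySem.Set.contains ws num then
      (if score = 0 then 1 else score * 2)
    else score) 0

-- ===== PORT B =====
-- winners = set(win_nums); matches = sum(1 for num in play_nums if num in winners);
-- return 0 if matches == 0 else 2 ** (matches - 1)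
def get_points_pt1_alt (win_nums : List Int) (play_nums : List Int) : Int :=
  let winners := PySem.Set.ofList win_nums
  let m := play_nums.countP (fun num => PySem.Set.contains winners num)
  if m = 0 then 0 else (2 : Int) ^ (m - 1)

-- ===== PRECONDITION & SPEC =====
def Spec_get_points_pt1 (win_nums : List Int) (play_nums : List Int) (out : Int) : Prop := out = get_points_pt1_alt win_nums play_nums
instance (win_nums : List Int) (play_nums : List Int) (out : Int) : Decidable (Spec_get_points_pt1 win_nums play_nums out) := by unfold Spec_get_points_pt1; infer_instance

-- ===== CLAIM (what is proved, stated in full; the proofs are below) =====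
def Claim_equal_get_points_pt1 : Prop := ∀ (win_nums : List Int) (play_nums : List Int), Dom_get_points_pt1 win_nums play_nums → Spec_get_points_pt1 win_nums play_nums (get_points_pt1 win_nums play_nums)

-- ===== LEMMAS AND PROOFS =====

-- Once the score is a positive power of two, each further match doubles it.
theorem loop_pow (ws : PySem.Set Int) (l : List Int) (k : Nat) :
    l.foldl (fun score num =>
      if PySem.Set.contains ws num then
        (if score = 0 then 1 else score * 2)
      else score) ((2 : Int) ^ k)
    = (2 : Int) ^ (k + l.countP (fun num => PySem.Set.contains ws num)) := by
  induction l generalizing k with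
  | nil => simp
  | cons h t ih =>
    by_cases hm : PySem.Set.contains ws h
    · have h2 : ((2 : Int) ^ k) ≠ 0 := by positivity
      simp only [List.foldl_cons, List.countP_cons, hm, if_pos, if_neg h2]
      have : (2 : Int) ^ k * 2 = (2 : Int) ^ (k + 1) := by ring
      rw [this, ih]
      simp; ring_nf
    · simp only [List.foldl_cons, List.countP_cons, hm, Bool.false_eq_true, if_false]
      rw [ih]; simp

-- Starting from 0, the loop computes the closed form.
theorem loop_closed (ws : PySem.Set Int) (l : List Int) :
    l.foldl (fun score num =>
      if PySem.Set.contains ws num then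
        (if score = 0 then 1 else score * 2)
      else score) 0
    = (if l.countP (fun num => PySem.Set.contains ws num) = 0 then 0
       else (2 : Int) ^ (l.countP (fun num => PySem.Set.contains ws num) - 1)) := by
  induction l with
  | nil => simp
  | cons h t ih =>
    by_cases hm : PySem.Set.contains ws h
    · simp only [List.foldl_cons, List.countP_cons, hm, if_pos]
      have h1 := loop_pow ws t 0
      simp only [pow_zero, Nat.zero_add] at h1
      rw [h1]; simp
    · simp only [List.foldl_cons, List.countP_cons, hm, Bool.false_eq_true, if_false]
      rw [ih]; simp

-- ===== VERDICT (by name: the statement is the Claim_ definition above) =====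
theorem get_points_pt1_spec : Claim_equal_get_points_pt1 := by
  intro win_nums play_nums _
  unfold Spec_get_points_pt1 get_points_pt1 get_points_pt1_alt
  exact loop_closed _ _
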